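-- pv_equiv track=rewrite | github.com/kongshan001/project-skill-generator | scripts/generate_skill.py | _normalize_skill_name
-- ===== SOURCE A (Python) =====
-- def _normalize_skill_name(module_name: str) -> str:
--     """Convert module name to skill name"""
--     # Handle empty or dot-only module names
--     if not module_name or module_name.strip() == '.':
--         return 'main-module'
--
--     # Replace dots and slashes with hyphens
--     name = module_name.replace('.', '-').replace('/', '-')
--     # Remove consecutive hyphens
--     while '--' in name:
--         name = name.replace('--', '-')
--     # Remove leading/trailing hyphens
--     name = name.strip('-')
--     return name.lower() if name else 'unnamed-module'
-- ===== SOURCE B (Python) =====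
-- def _normalize_skill_name(module_name: str) -> str:
--     """Convert module name to skill name"""
--     # Handle empty or dot-only module names
--     if not module_name or module_name.strip() == '.':
--         return 'main-module'
--
--     # Single left-to-right scan: map '.'/'/' to '-', never emit two '-' in a row
--     out = []
--     for ch in module_name:
--         c = '-' if ch == '.' or ch == '/' else ch
--         if c == '-' and out and out[-1] == '-':
--             continue
--         out.append(c)
--     name = ''.join(out).strip('-')
--     return name.lower() if name else 'unnamed-module'
-- ===== Notes on version B (the rewrite author's own statement) =====
-- stated objective: simpler
-- what changed: Replaces the two full-string replace passes plus the while-loop that repeatedly rescans the whole string to collapse doubled hyphens with one left-to-right scan that maps dot and slash to a hyphen and never emits two consecutive hyphens.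
import Mathlib
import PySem

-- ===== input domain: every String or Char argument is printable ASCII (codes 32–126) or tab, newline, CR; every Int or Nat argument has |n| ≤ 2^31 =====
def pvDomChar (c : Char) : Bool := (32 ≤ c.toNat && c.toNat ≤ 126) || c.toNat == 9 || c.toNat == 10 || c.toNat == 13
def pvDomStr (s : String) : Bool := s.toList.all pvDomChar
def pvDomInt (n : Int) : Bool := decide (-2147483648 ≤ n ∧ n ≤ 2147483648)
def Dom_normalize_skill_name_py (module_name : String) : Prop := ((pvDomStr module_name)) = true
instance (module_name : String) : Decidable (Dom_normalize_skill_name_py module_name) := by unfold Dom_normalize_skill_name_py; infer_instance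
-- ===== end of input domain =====

-- B replaces A's two full-string replace() passes and the while-loop '--' rescans by one
-- left-to-right scan that never emits two consecutive hyphens (simpler, single pass).

-- ===== PORT A =====
-- helpers needed by port A's while-loop termination proof
def pvRep : List Char → List Char
  | [] => []
  | [c] => [c]
  | a :: b :: t => if a = '-' ∧ b = '-' then '-' :: pvRep t else a :: pvRep (b :: t)

def pvNoDD : List Char → Bool
  | a :: b :: t => if a = '-' ∧ b = '-' then false else pvNoDD (b :: t)
  | _ => true

theorem pvRep_go (fuel : Nat) (l acc : List Char) (h : l.length ≤ fuel) :
    PySem.Chars.replace.go ['-', '-'] ['-'] fuel l acc = acc.reverse ++ pvRep l := by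
  induction fuel generalizing l acc with
  | zero =>
    have : l = [] := by cases l <;> simp_all
    subst this
    rw [PySem.Chars.replace.go.eq_def]
    simp [pvRep]
  | succ fuel ih =>
    match l with
    | [] => rw [PySem.Chars.replace.go.eq_def]; simp [pvRep]
    | [c] =>
      rw [PySem.Chars.replace.go.eq_def]
      have hp : List.isPrefixOf ['-', '-'] [c] = false := by simp [List.isPrefixOf]
      simp only [hp, Bool.false_eq_true, if_false]
      rw [ih [] (c :: acc) (by simp)]
      simp [pvRep]
    | a :: b :: t =>
      rw [PySem.Chars.replace.go.eq_def]
      by_cases hab : a = '-' ∧ b = '-'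
      · obtain ⟨ha, hb⟩ := hab; subst ha; subst hb
        have hp : List.isPrefixOf ['-', '-'] ('-' :: '-' :: t) = true := by
          simp [List.isPrefixOf]
        simp only [hp, if_true]
        have ht : t.length ≤ fuel := by simp at h; omega
        rw [show (List.drop (['-', '-'] : List Char).length ('-' :: '-' :: t)) = t from rfl]
        rw [ih t (['-'].reverse ++ acc) ht]
        simp [pvRep]
      · have hp : List.isPrefixOf ['-', '-'] (a :: b :: t) = false := by
          simp [List.isPrefixOf]
          intro ha hb
          exact hab ⟨ha.symm, hb.symm⟩
        simp only [hp, Bool.false_eq_true, if_false]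
        rw [ih (b :: t) (a :: acc) (by simp at h ⊢; omega)]
        simp [pvRep, hab]

theorem pvReplace_dd_eq (l : List Char) :
    PySem.Chars.replace l ['-', '-'] ['-'] = pvRep l := by
  unfold PySem.Chars.replace
  simp only [List.isEmpty_cons, if_false, Bool.false_eq_true]
  exact pvRep_go l.length l [] le_rfl

theorem pvRep_length_le (l : List Char) : (pvRep l).length ≤ l.length := by
  induction l using pvRep.induct with
  | case1 => simp [pvRep]
  | case2 c => simp [pvRep]
  | case3 a b t h ih => simp [pvRep, h]; omega
  | case4 a b t h ih => simp [pvRep, h] at ih ⊢; omega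

theorem pvNoDD_false_rep_lt (l : List Char) (h : pvNoDD l = false) :
    (pvRep l).length < l.length := by
  induction l using pvRep.induct with
  | case1 => simp [pvNoDD] at h
  | case2 c => simp [pvNoDD] at h
  | case3 a b t hc ih =>
    have := pvRep_length_le t
    simp [pvRep, hc]; omega
  | case4 a b t hc ih =>
    have hnd : pvNoDD (b :: t) = false := by
      have hu : pvNoDD (a :: b :: t) = if a = '-' ∧ b = '-' then false else pvNoDD (b :: t) := rfl
      rw [hu, if_neg hc] at h
      exact h
    have := ih hnd
    simp [pvRep, hc] at this ⊢
    omega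

theorem pvNoDD_cons_false (a : Char) (t : List Char) (h : pvNoDD t = false) :
    pvNoDD (a :: t) = false := by
  match t with
  | [] => simp [pvNoDD] at h
  | b :: t' =>
    have hu : pvNoDD (a :: b :: t') = if a = '-' ∧ b = '-' then false else pvNoDD (b :: t') := rfl
    rw [hu]
    split
    · rfl
    · exact h

theorem pvInfix_dd_noDD_false (l : List Char) (h : ['-', '-'] <:+: l) :
    pvNoDD l = false := by
  obtain ⟨u, v, huv⟩ := h
  subst huv
  induction u with
  | nil => simp [pvNoDD]
  | cons a u ih => exact pvNoDD_cons_false a _ ih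

theorem pvIsIn_dd_lt (l : List Char) (h : PySem.Chars.isIn ['-', '-'] l = true) :
    (PySem.Chars.replace l ['-', '-'] ['-']).length < l.length := by
  rw [pvReplace_dd_eq]
  exact pvNoDD_false_rep_lt l (pvInfix_dd_noDD_false l ((PySem.Chars.isIn_iff_infix _ _).mp h))

-- the 'while "--" in name: name = name.replace("--", "-")' loop of A
def pvCollapse (l : List Char) : List Char :=
  if h : PySem.Chars.isIn ['-', '-'] l = true then
    pvCollapse (PySem.Chars.replace l ['-', '-'] ['-'])
  else l
termination_by l.length
decreasing_by exact pvIsIn_dd_lt l h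

def normalize_skill_name_py (module_name : String) : String :=
  if module_name = "" || PySem.Str.strip module_name = "." then "main-module"
  else
    let name := PySem.Chars.replace (PySem.Chars.replace module_name.toList ['.'] ['-']) ['/'] ['-']
    let name := pvCollapse name
    let name := PySem.Chars.stripChars name ['-']
    if name = [] then "unnamed-module" else String.mk (PySem.Chars.lower name)

-- ===== PORT B =====
def normalize_skill_name_py_alt (module_name : String) : String :=
  if module_name = "" || PySem.Str.strip module_name = "." then "main-module"
  else
    let out := module_name.toList.foldl (fun acc ch =>
      let c := if ch = '.' || ch = '/' then '-' else ch
      if c = '-' ∧ acc ≠ [] ∧ PySem.List.pyGet? acc (-1) = some '-' then acc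
      else acc ++ [c]) []
    let name := PySem.Chars.stripChars out ['-']
    if name = [] then "unnamed-module" else String.mk (PySem.Chars.lower name)

-- ===== PRECONDITION & SPEC =====
def Spec_normalize_skill_name_py (module_name : String) (out : String) : Prop := out = normalize_skill_name_py_alt module_name
instance (module_name : String) (out : String) : Decidable (Spec_normalize_skill_name_py module_name out) := by unfold Spec_normalize_skill_name_py; infer_instance

-- ===== CLAIM (what is proved, stated in full; the proofs are below) =====
def Claim_equal_normalize_skill_name_py : Prop := ∀ (module_name : String), Dom_normalize_skill_name_py module_name → Spec_normalize_skill_name_py module_name (normalize_skill_name_py module_name)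

-- ===== LEMMAS AND PROOFS =====
def pvF (c : Char) : Char := if c = '.' || c = '/' then '-' else c

def pvSqA : Char → List Char → List Char
  | _, [] => []
  | a, c :: t => if c = '-' ∧ a = '-' then pvSqA a t else c :: pvSqA c t

def pvSq : List Char → List Char
  | [] => []
  | a :: t => a :: pvSqA a t

theorem pvReplace_single_go (c0 : Char) (fuel : Nat) (l acc : List Char) (h : l.length ≤ fuel) :
    PySem.Chars.replace.go [c0] ['-'] fuel l acc
      = acc.reverse ++ l.map (fun c => if c = c0 then '-' else c) := by
  induction fuel generalizing l acc with
  | zero =>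
    have : l = [] := by cases l <;> simp_all
    subst this
    rw [PySem.Chars.replace.go.eq_def]; simp
  | succ fuel ih =>
    match l with
    | [] => rw [PySem.Chars.replace.go.eq_def]; simp
    | c :: t =>
      rw [PySem.Chars.replace.go.eq_def]
      by_cases hc : c = c0
      · subst hc
        have hp : List.isPrefixOf [c] (c :: t) = true := by simp [List.isPrefixOf]
        simp only [hp, if_true]
        rw [show (List.drop ([c] : List Char).length (c :: t)) = t from rfl]
        rw [ih t _ (by simp at h; omega)]
        simp
      · have hp : List.isPrefixOf [c0] (c :: t) = false := by
          simp [List.isPrefixOf]; exact fun hh => hc hh.symm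
        simp only [hp, Bool.false_eq_true, if_false]
        rw [ih t _ (by simp at h; omega)]
        simp [hc]

theorem pvReplace_single (c0 : Char) (l : List Char) :
    PySem.Chars.replace l [c0] ['-'] = l.map (fun c => if c = c0 then '-' else c) := by
  unfold PySem.Chars.replace
  simp only [List.isEmpty_cons, if_false, Bool.false_eq_true]
  exact pvReplace_single_go c0 l.length l [] le_rfl

theorem pvMap_comp (l : List Char) :
    (l.map (fun c => if c = '.' then '-' else c)).map (fun c => if c = '/' then '-' else c)
      = l.map pvF := by
  rw [List.map_map]
  apply List.map_congr_left
  intro c _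
  simp only [Function.comp, pvF]
  by_cases h1 : c = '.' <;> by_cases h2 : c = '/' <;> simp [h1, h2]

theorem pvSqA_rep (a : Char) (l : List Char) : pvSqA a (pvRep l) = pvSqA a l := by
  induction l using pvRep.induct generalizing a with
  | case1 => rfl
  | case2 c => rfl
  | case3 b c t h ih =>
    obtain ⟨hb, hc⟩ := h; subst hb; subst hc
    simp only [pvRep]
    by_cases ha : a = '-'
    · simp [pvSqA, ha, ih]
    · simp [pvSqA, ha, ih]
  | case4 b c t h ih =>
    simp only [pvRep, if_neg h]
    by_cases hba : b = '-' ∧ a = '-'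
    · simp [pvSqA, hba, ih]
    · simp [pvSqA, hba, ih]

theorem pvSq_rep (l : List Char) : pvSq (pvRep l) = pvSq l := by
  match l with
  | [] => rfl
  | [c] => rfl
  | a :: b :: t =>
    by_cases h : a = '-' ∧ b = '-'
    · obtain ⟨ha, hb⟩ := h; subst ha; subst hb
      simp only [pvRep]
      simp [pvSq, pvSqA, pvSqA_rep]
    · simp only [pvRep, if_neg h]
      simp [pvSq, pvSqA_rep]

theorem pvNoDD_sqA (a : Char) (t : List Char) (h : pvNoDD (a :: t) = true) :
    pvSqA a t = t := by
  induction t generalizing a with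
  | nil => rfl
  | cons c t' ih =>
    have hu : pvNoDD (a :: c :: t') = if a = '-' ∧ c = '-' then false else pvNoDD (c :: t') := rfl
    rw [hu] at h
    by_cases hac : a = '-' ∧ c = '-'
    · rw [if_pos hac] at h; exact absurd h (by simp)
    · rw [if_neg hac] at h
      have hne : ¬ (c = '-' ∧ a = '-') := fun hh => hac ⟨hh.2, hh.1⟩
      simp [pvSqA, hne, ih c h]

theorem pvNoDD_false_infix (l : List Char) : pvNoDD l = false → ['-', '-'] <:+: l := by
  induction l using pvRep.induct with
  | case1 => intro h; simp [pvNoDD] at h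
  | case2 c => intro h; simp [pvNoDD] at h
  | case3 a b t h ih =>
    intro _
    obtain ⟨ha, hb⟩ := h; subst ha; subst hb
    exact ⟨[], t, rfl⟩
  | case4 a b t h ih =>
    intro hf
    have hu : pvNoDD (a :: b :: t) = if a = '-' ∧ b = '-' then false else pvNoDD (b :: t) := rfl
    rw [hu, if_neg h] at hf
    obtain ⟨u, v, huv⟩ := ih hf
    exact ⟨a :: u, v, by simp [← huv]⟩

theorem pvNoDD_true_of_not_infix (l : List Char) (h : ¬ ['-', '-'] <:+: l) :
    pvNoDD l = true := by
  cases hb : pvNoDD l with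
  | true => rfl
  | false => exact absurd (pvNoDD_false_infix l hb) h

theorem pvCollapse_eq_sq (l : List Char) : pvCollapse l = pvSq l := by
  induction hn : l.length using Nat.strong_induction_on generalizing l with
  | _ n ih =>
  subst hn
  rw [pvCollapse]
  by_cases h : PySem.Chars.isIn ['-', '-'] l = true
  · simp only [h, dif_pos]
    rw [pvReplace_dd_eq]
    rw [ih (pvRep l).length (by
      have := pvNoDD_false_rep_lt l (pvInfix_dd_noDD_false l ((PySem.Chars.isIn_iff_infix _ _).mp h))
      omega) (pvRep l) rfl]
    exact pvSq_rep l
  · rw [dif_neg h]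
    have hno : pvNoDD l = true := by
      apply pvNoDD_true_of_not_infix
      intro hinf
      exact h ((PySem.Chars.isIn_iff_infix _ _).mpr hinf)
    match l with
    | [] => rfl
    | a :: t => simp [pvSq, pvNoDD_sqA a t hno]

def pvStep (acc : List Char) (ch : Char) : List Char :=
  let c := if ch = '.' || ch = '/' then '-' else ch
  if c = '-' ∧ acc ≠ [] ∧ PySem.List.pyGet? acc (-1) = some '-' then acc
  else acc ++ [c]

theorem pvGet_last {α : Type} (acc : List α) (a : α) :
    PySem.List.pyGet? (acc ++ [a]) (-1) = some a := by
  simp [PySem.List.pyGet?, PySem.List.pyIdx?]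

theorem pvFoldl_sqA (l : List Char) (acc : List Char) (a : Char) :
    List.foldl pvStep (acc ++ [a]) l = acc ++ [a] ++ pvSqA a (l.map pvF) := by
  induction l generalizing acc a with
  | nil => simp [pvSqA]
  | cons ch t ih =>
    simp only [List.foldl_cons, List.map_cons]
    have hstep : pvStep (acc ++ [a]) ch
        = if pvF ch = '-' ∧ a = '-' then acc ++ [a] else (acc ++ [a]) ++ [pvF ch] := by
      show (if pvF ch = '-' ∧ (acc ++ [a]) ≠ [] ∧ PySem.List.pyGet? (acc ++ [a]) (-1) = some '-'
              then acc ++ [a] else (acc ++ [a]) ++ [pvF ch]) = _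
      rw [pvGet_last]
      by_cases h : pvF ch = '-' ∧ a = '-'
      · rw [if_pos ⟨h.1, by simp, by rw [h.2]⟩, if_pos h]
      · rw [if_neg (fun hc => h ⟨hc.1, by simpa using hc.2.2⟩), if_neg h]
    rw [hstep]
    by_cases h : pvF ch = '-' ∧ a = '-'
    · rw [if_pos h, ih acc a]
      simp [pvSqA, h]
    · rw [if_neg h]
      rw [show (acc ++ [a]) ++ [pvF ch] = (acc ++ [a]) ++ [pvF ch] from rfl, ih (acc ++ [a]) (pvF ch)]
      simp [pvSqA, h]

theorem pvFoldl_sq (c : Char) (t : List Char) :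
    List.foldl pvStep [] (c :: t) = pvSq ((c :: t).map pvF) := by
  simp only [List.foldl_cons]
  have h1 : pvStep [] c = [pvF c] := by simp [pvStep, pvF]
  rw [h1, show ([pvF c] : List Char) = [] ++ [pvF c] from rfl, pvFoldl_sqA]
  simp [pvSq]

-- ===== VERDICT (by name: the statement is the Claim_ definition above) =====
theorem normalize_skill_name_py_spec : Claim_equal_normalize_skill_name_py := by
  intro s _
  unfold Spec_normalize_skill_name_py normalize_skill_name_py normalize_skill_name_py_alt
  by_cases hg : (s = "" || PySem.Str.strip s = ".") = true
  · simp [hg]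
  · simp only [hg, Bool.false_eq_true, if_false]
    have hs : s.toList ≠ [] := by
      intro hnil
      apply hg
      simp only [Bool.or_eq_true, decide_eq_true_eq]
      left
      exact String.toList_eq_nil_iff.mp hnil
    match hl : s.toList with
    | [] => exact absurd hl hs
    | c :: t =>
      have hA : pvCollapse (PySem.Chars.replace (PySem.Chars.replace (c :: t) ['.'] ['-']) ['/'] ['-'])
          = pvSq ((c :: t).map pvF) := by
        rw [pvReplace_single, pvReplace_single, pvMap_comp, pvCollapse_eq_sq]
      have hB : List.foldl pvStep [] (c :: t) = pvSq ((c :: t).map pvF) := pvFoldl_sq c t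
      rw [hA, show (fun (acc : List Char) (ch : Char) =>
        let c := if ch = '.' || ch = '/' then '-' else ch
        if c = '-' ∧ acc ≠ [] ∧ PySem.List.pyGet? acc (-1) = some '-' then acc
        else acc ++ [c]) = pvStep from rfl, hB]
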